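-- pv_equiv track=rewrite | github.com/pipepipexiaji/numpy | celluar_automation.py | compute_neighbours
-- ===== SOURCE A (Python) =====
-- def compute_neighbours(Z):
--     shape = (len(Z), len(Z[0]))
--     N = [[0,]*(shape[0]) for i in range(shape[1])]
--     for x in range(1, shape[0]-1):
--         for y in range(1, shape[1]-1):
--             N[x][y] = Z[x-1][y-1]+Z[x][y-1]+Z[x+1][y-1] \
--                     + Z[x-1][y]            +Z[x+1][y]   \
--                     + Z[x-1][y+1]+Z[x][y+1]+Z[x+1][y+1]
--
--     return N
-- ===== SOURCE B (Python) =====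
-- def compute_neighbours(Z):
--     # Separable scheme: one pass of horizontal triple sums per row (slices),
--     # then each interior cell is a vertical sum of three triples minus the centre.
--     rows, cols = len(Z), len(Z[0])
--     T = [[sum(row[y - 1:y + 2]) for y in range(1, cols - 1)] for row in Z]
--     N = [[0] * rows for _ in range(cols)]
--     for x in range(1, rows - 1):
--         for y in range(1, cols - 1):
--             N[x][y] = T[x - 1][y - 1] + T[x][y - 1] + T[x + 1][y - 1] - Z[x][y]
--     return N
-- ===== Notes on version B (the rewrite author's own statement) =====
-- stated objective: alternative
-- what changed: B replaces A's eight explicit neighbour additions per cell with a separable two-pass scheme: a first pass precomputes horizontal triple sums per row via slices, and the interior loop then combines three vertical table lookups minus the centre.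
import Mathlib
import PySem

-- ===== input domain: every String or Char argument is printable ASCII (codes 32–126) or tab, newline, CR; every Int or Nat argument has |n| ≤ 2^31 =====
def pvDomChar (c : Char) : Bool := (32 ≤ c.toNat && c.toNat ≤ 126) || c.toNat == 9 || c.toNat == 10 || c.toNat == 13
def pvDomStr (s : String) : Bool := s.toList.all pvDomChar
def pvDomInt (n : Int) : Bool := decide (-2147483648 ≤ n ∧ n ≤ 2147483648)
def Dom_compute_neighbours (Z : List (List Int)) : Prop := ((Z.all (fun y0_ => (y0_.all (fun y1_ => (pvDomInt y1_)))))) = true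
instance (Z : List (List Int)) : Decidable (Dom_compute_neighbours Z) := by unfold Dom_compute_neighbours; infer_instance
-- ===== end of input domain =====

-- B computes the 8-neighbour sums separably: a first pass of horizontal triple
-- sums per row (via slices), then each interior cell is a vertical sum of three
-- triples minus the centre, replacing A's eight explicit additions per cell
-- (objective: alternative; B fills the same preallocated grid A returns).


-- ===== PORT A =====
-- Z[i][j]; under Pre_ every read index is nonnegative and in range
-- (Python raises IndexError on the excluded inputs).
def pvZ (Z : List (List Int)) (i j : Int) : Int :=
  PySem.List.pyGetD (PySem.List.pyGetD Z i []) j 0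

-- N[x][y] = v; under Pre_ every written index is nonnegative and in range
-- (Python raises IndexError on the excluded inputs, where List.set is a no-op).
def pvSet (N : List (List Int)) (x y : Int) (v : Int) : List (List Int) :=
  N.set x.toNat ((N.getD x.toNat []).set y.toNat v)

def compute_neighbours (Z : List (List Int)) : List (List Int) :=
  -- shape = (len(Z), len(Z[0])); Z[0] raises on Z = [] (excluded by Pre_)
  let rows : Int := Z.length
  let cols : Int := (Z.headD []).length
  let N0 : List (List Int) :=
    List.replicate (Z.headD []).length (List.replicate Z.length (0 : Int))
  (PySem.List.pyRange 1 (rows - 1) 1).foldl (fun N x =>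
    (PySem.List.pyRange 1 (cols - 1) 1).foldl (fun N y =>
      pvSet N x y
        (pvZ Z (x-1) (y-1) + pvZ Z x (y-1) + pvZ Z (x+1) (y-1)
         + pvZ Z (x-1) y + pvZ Z (x+1) y
         + pvZ Z (x-1) (y+1) + pvZ Z x (y+1) + pvZ Z (x+1) (y+1))) N) N0

-- ===== PORT B =====
-- sum(row[y-1:y+2])
def pvTriple (row : List Int) (y : Int) : Int :=
  (PySem.List.slice row (some (y - 1)) (some (y + 2))).sum

def compute_neighbours_alt (Z : List (List Int)) : List (List Int) :=
  let rows : Int := Z.length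
  let cols : Int := (Z.headD []).length    -- Z[0] raises on Z = [] (excluded by Pre_)
  let T : List (List Int) :=
    Z.map (fun row => (PySem.List.pyRange 1 (cols - 1) 1).map (fun y => pvTriple row y))
  let N0 : List (List Int) :=
    List.replicate (Z.headD []).length (List.replicate Z.length (0 : Int))
  (PySem.List.pyRange 1 (rows - 1) 1).foldl (fun N x =>
    (PySem.List.pyRange 1 (cols - 1) 1).foldl (fun N y =>
      pvSet N x y
        (pvZ T (x-1) (y-1) + pvZ T x (y-1) + pvZ T (x+1) (y-1) - pvZ Z x y)) N) N0

-- ===== PRECONDITION & SPEC =====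
-- Pre_ is exactly the set of inputs on which the Python A returns: Z nonempty
-- (Z[0] is read), and whenever the interior loop runs (rows ≥ 3 and cols ≥ 3)
-- every row must be at least cols long and the transposed output grid must be
-- wide and tall enough for A's writes N[x][y] (|rows - cols| ≤ 1); on every
-- other input A raises IndexError.
def Pre_compute_neighbours (Z : List (List Int)) : Prop :=
  Z ≠ [] ∧
  (3 ≤ Z.length ∧ 3 ≤ (Z.headD []).length →
    (∀ row ∈ Z, (Z.headD []).length ≤ row.length) ∧
    Z.length ≤ (Z.headD []).length + 1 ∧ (Z.headD []).length ≤ Z.length + 1)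

instance (Z : List (List Int)) : Decidable (Pre_compute_neighbours Z) := by
  unfold Pre_compute_neighbours; infer_instance

def pvWitness_compute_neighbours : List (List Int) := [[1,2,3],[4,5,6],[7,8,9]]

def Spec_compute_neighbours (Z : List (List Int)) (out : List (List Int)) : Prop := out = compute_neighbours_alt Z
instance (Z : List (List Int)) (out : List (List Int)) : Decidable (Spec_compute_neighbours Z out) := by unfold Spec_compute_neighbours; infer_instance

-- ===== CLAIM (what is proved, stated in full; the proofs are below) =====
def Claim_equal_compute_neighbours : Prop := ∀ (Z : List (List Int)), Dom_compute_neighbours Z → Pre_compute_neighbours Z → Spec_compute_neighbours Z (compute_neighbours Z)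

-- ===== LEMMAS AND PROOFS =====

-- B's table of horizontal triple sums
def TZ (Z : List (List Int)) : List (List Int) :=
  Z.map (fun row =>
    (PySem.List.pyRange 1 (((Z.headD []).length : Int) - 1) 1).map (fun y => pvTriple row y))

theorem pvZ_cast (Z : List (List Int)) (i j : Nat) :
    pvZ Z ↑i ↑j = (Z.getD i []).getD j 0 := by
  simp [pvZ, PySem.List.pyGetD_natCast]

theorem Tval (Z : List (List Int))
    (hrow : ∀ row ∈ Z, (Z.headD []).length ≤ row.length)
    (i j : Nat) (hi : i < Z.length) (hj : j + 2 < (Z.headD []).length) :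
    pvZ (TZ Z) ↑i ↑j =
      (Z.getD i []).getD j 0 + (Z.getD i []).getD (j+1) 0 + (Z.getD i []).getD (j+2) 0 := by
  have hiZ : Z.getD i [] ∈ Z := by
    rw [List.getD_eq_getElem _ _ hi]; exact List.getElem_mem hi
  have hlen : j + 3 ≤ (Z.getD i []).length := le_trans (by omega) (hrow _ hiZ)
  unfold pvZ TZ
  simp only [PySem.List.pyGetD_natCast]
  have hmapl : i < (List.map (fun row =>
      (PySem.List.pyRange 1 (((Z.headD []).length : Int) - 1) 1).map
        (fun y => pvTriple row y)) Z).length := by simpa using hi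
  rw [List.getD_eq_getElem _ _ hmapl, List.getElem_map, ← List.getD_eq_getElem Z [] hi]
  rw [List.getD_eq_getElem?_getD, List.getElem?_map, PySem.List.getElem?_pyRange_one,
    if_pos (show j < ((((Z.headD []).length : Int) - 1) - 1).toNat by omega)]
  simp only [Option.map_some, Option.getD_some]
  unfold pvTriple
  rw [show (1:Int) + ↑j - 1 = ((j:Nat):Int) by ring,
    show (1:Int) + ↑j + 2 = ((j:Nat):Int) + ((3:Nat):Int) by push_cast; ring]
  rw [PySem.List.slice_natCast_add]
  rw [← List.getElem_cons_drop (show j < (Z.getD i []).length by omega)]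
  rw [← List.getElem_cons_drop (show j+1 < (Z.getD i []).length by omega)]
  rw [← List.getElem_cons_drop (show j+1+1 < (Z.getD i []).length by omega)]
  have t3 : ∀ (a b c : Int) (t : List Int), List.take 3 (a :: b :: c :: t) = [a, b, c] :=
    fun _ _ _ _ => rfl
  rw [t3]
  simp only [List.sum_cons, List.sum_nil]
  rw [List.getD_eq_getElem _ _ (show j < (Z.getD i []).length by omega),
    List.getD_eq_getElem _ _ (show j+1 < (Z.getD i []).length by omega),
    List.getD_eq_getElem _ _ (show j+2 < (Z.getD i []).length by omega)]
  simp only [show j+1+1 = j+2 from rfl]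
  ring

-- A's eight additions equal B's three-triple combination on the interior
theorem interior_eq (Z : List (List Int))
    (hrow : ∀ row ∈ Z, (Z.headD []).length ≤ row.length) (x y : Int)
    (hr1 : 1 ≤ x) (hr2 : x < (Z.length:Int) - 1)
    (hc1 : 1 ≤ y) (hc2 : y < ((Z.headD []).length:Int) - 1) :
    pvZ Z (x-1) (y-1) + pvZ Z x (y-1) + pvZ Z (x+1) (y-1)
      + pvZ Z (x-1) y + pvZ Z (x+1) y
      + pvZ Z (x-1) (y+1) + pvZ Z x (y+1) + pvZ Z (x+1) (y+1) =
    pvZ (TZ Z) (x-1) (y-1) + pvZ (TZ Z) x (y-1) + pvZ (TZ Z) (x+1) (y-1) - pvZ Z x y := by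
  obtain ⟨r, rfl⟩ : ∃ r : Nat, (r : Int) = x := ⟨x.toNat, by omega⟩
  obtain ⟨c, rfl⟩ : ∃ c : Nat, (c : Int) = y := ⟨y.toNat, by omega⟩
  rw [show (↑r:Int) - 1 = ↑(r-1) by omega, show (↑r:Int) + 1 = ↑(r+1) by push_cast; ring,
    show (↑c:Int) - 1 = ↑(c-1) by omega, show (↑c:Int) + 1 = ↑(c+1) by push_cast; ring]
  rw [Tval Z hrow (r-1) (c-1) (by omega) (by omega),
    Tval Z hrow r (c-1) (by omega) (by omega),
    Tval Z hrow (r+1) (c-1) (by omega) (by omega)]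
  simp only [pvZ_cast]
  rw [show c-1+1 = c by omega, show c-1+2 = c+1 by omega]
  ring

-- ===== VERDICT (by name: the statement is the Claim_ definition above) =====
theorem compute_neighbours_spec : Claim_equal_compute_neighbours := by
  intro Z _hdom hpre
  unfold Spec_compute_neighbours
  unfold compute_neighbours compute_neighbours_alt
  dsimp only
  refine PySem.List.foldl_congr_mem _ _ _ _ ?_
  intro N x hx
  refine PySem.List.foldl_congr_mem _ _ _ _ ?_
  intro N' y hy
  congr 1
  rw [PySem.List.mem_pyRange_one] at hx hy
  have hrow : ∀ row ∈ Z, (Z.headD []).length ≤ row.length :=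
    (hpre.2 ⟨by omega, by omega⟩).1
  rw [interior_eq Z hrow x y (by omega) (by omega) (by omega) (by omega)]
  rfl
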